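-- pv_equiv track=rewrite | github.com/Crummett/BAR-Programming-Task | PhoneticSearcher.py | disregarder
-- ===== SOURCE A (Python) =====
-- def disregarder(nameInput, equivalentsDictionary):
--     name, equivalents = nameInput, equivalentsDictionary
--     # Keeps the 1st letter
--     firstStage = name[0]
--     # Removes any of the letters disregardable after the first
--     for letter in name[1:]:
--         if (letter not in ['a', 'e', 'i', 'h', 'o', 'u', 'w', 'y']):
--             firstStage = firstStage + letter
--     # Keeps the 1st letter
--     secondStage = name[0]
--     # Removes any letters that are equivalent to the previous letter
--     for letterNum in range(1, len(firstStage)):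
--         if (firstStage[letterNum] not in equivalents[firstStage[letterNum-1]]):
--             secondStage = secondStage + firstStage[letterNum]
--
--     return secondStage
-- ===== SOURCE B (Python) =====
-- _DISREGARD = frozenset(('a', 'e', 'i', 'h', 'o', 'u', 'w', 'y'))
--
-- def disregarder(nameInput, equivalentsDictionary):
--     # Single fused pass: prev tracks the last letter that survived the disregard
--     # filter; a surviving letter is appended unless equivalent to prev.
--     result = nameInput[0]
--     prev = nameInput[0]
--     for letter in nameInput[1:]:
--         if letter in _DISREGARD:
--             continue
--         if letter not in equivalentsDictionary[prev]:
--             result += letter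
--         prev = letter
--     return result
-- ===== Notes on version B (the rewrite author's own statement) =====
-- stated objective: simpler
-- what changed: The two passes (build the vowel-filtered intermediate string, then re-scan it by index against the equivalents dict) are fused into one loop over name[1:] that tracks the previous surviving letter, so no intermediate string and no index arithmetic.
import Mathlib
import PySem

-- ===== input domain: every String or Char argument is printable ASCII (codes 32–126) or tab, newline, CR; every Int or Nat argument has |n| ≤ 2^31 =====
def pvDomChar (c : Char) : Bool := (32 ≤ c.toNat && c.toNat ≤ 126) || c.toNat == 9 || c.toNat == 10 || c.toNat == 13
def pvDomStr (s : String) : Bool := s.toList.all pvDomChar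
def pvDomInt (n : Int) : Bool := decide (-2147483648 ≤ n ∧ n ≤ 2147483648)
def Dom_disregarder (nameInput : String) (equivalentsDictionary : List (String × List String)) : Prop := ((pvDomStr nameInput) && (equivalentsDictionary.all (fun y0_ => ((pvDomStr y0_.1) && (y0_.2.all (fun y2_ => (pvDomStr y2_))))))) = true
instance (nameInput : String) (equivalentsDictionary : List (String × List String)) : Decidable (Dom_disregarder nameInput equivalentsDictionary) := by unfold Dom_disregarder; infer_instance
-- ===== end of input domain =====

-- B fuses A's two passes into one loop over name[1:] tracking the previous surviving letter (simpler: no intermediate string, no index arithmetic).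

-- letters disregarded after the first (shared literal of both programs)
def pvDisregard : List Char := ['a', 'e', 'i', 'h', 'o', 'u', 'w', 'y']

-- ===== PORT A =====
-- equivalents[k]: dict lookup = first match in the association list
def pvLookup (d : List (String × List String)) (c : Char) : Option (List String) :=
  d.lookup (String.ofList [c])

-- loop body of A's second stage (indexing into firstStage; KeyError ⇒ none branch, excluded by Pre_)
def pvStepA (d : List (String × List String)) (fs : List Char) (acc : List Char) (i : Int) : List Char :=
  match pvLookup d (PySem.List.pyGetD fs (i - 1) ' ') with
  | some l => if String.ofList [PySem.List.pyGetD fs i ' '] ∉ l then acc ++ [PySem.List.pyGetD fs i ' '] else acc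
  | none => acc

def disregarder (nameInput : String) (equivalentsDictionary : List (String × List String)) : String :=
  match nameInput.toList with
  | [] => ""  -- Python raises IndexError on name[0]; excluded by Pre_
  | c :: rest =>
    -- firstStage: keep the first letter, drop disregardable letters of the tail
    let firstStage := rest.foldl (fun acc letter => if letter ∉ pvDisregard then acc ++ [letter] else acc) [c]
    -- secondStage: for letterNum in range(1, len(firstStage)) drop letters equivalent to the previous one
    let secondStage := (PySem.List.pyRange 1 (PySem.List.len firstStage) 1).foldl (pvStepA equivalentsDictionary firstStage) [c]
    String.ofList secondStage

-- ===== PORT B =====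
-- loop body of B: state = (result so far, previous surviving letter); KeyError ⇒ none branch, excluded by Pre_
def pvStepB (d : List (String × List String)) (st : List Char × Char) (letter : Char) : List Char × Char :=
  if letter ∈ pvDisregard then st
  else
    match pvLookup d st.2 with
    | some l => (if String.ofList [letter] ∉ l then st.1 ++ [letter] else st.1, letter)
    | none => (st.1 ++ [letter], letter)

def disregarder_alt (nameInput : String) (equivalentsDictionary : List (String × List String)) : String :=
  match nameInput.toList with
  | [] => ""  -- Python raises IndexError on nameInput[0]; excluded by Pre_
  | c :: rest =>
    String.ofList (rest.foldl (pvStepB equivalentsDictionary) ([c], c)).1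

-- ===== PRECONDITION & SPEC =====
-- the dict keys both programs query: every surviving letter except the last one
def pvKeysL : List Char → List Char
  | [] => []
  | c :: rest => (c :: rest.filter (fun letter => letter ∉ pvDisregard)).dropLast

-- Pre_ excludes exactly the inputs where Python A raises: the empty name (IndexError)
-- and names whose queried surviving letters miss a key of the dict (KeyError).
def Pre_disregarder (nameInput : String) (equivalentsDictionary : List (String × List String)) : Prop :=
  nameInput ≠ "" ∧ (pvKeysL nameInput.toList).all (fun c => (pvLookup equivalentsDictionary c).isSome) = true
instance (nameInput : String) (equivalentsDictionary : List (String × List String)) : Decidable (Pre_disregarder nameInput equivalentsDictionary) := by unfold Pre_disregarder; infer_instance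

def pvWitness_disregarder : String × (List (String × List String)) := ("bob", [("b", ["c"])])

def Spec_disregarder (nameInput : String) (equivalentsDictionary : List (String × List String)) (out : String) : Prop := out = disregarder_alt nameInput equivalentsDictionary
instance (nameInput : String) (equivalentsDictionary : List (String × List String)) (out : String) : Decidable (Spec_disregarder nameInput equivalentsDictionary out) := by unfold Spec_disregarder; infer_instance

-- ===== CLAIM (what is proved, stated in full; the proofs are below) =====
def Claim_equal_disregarder : Prop := ∀ (nameInput : String) (equivalentsDictionary : List (String × List String)), Dom_disregarder nameInput equivalentsDictionary → Pre_disregarder nameInput equivalentsDictionary → Spec_disregarder nameInput equivalentsDictionary (disregarder nameInput equivalentsDictionary)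

-- ===== LEMMAS AND PROOFS =====

-- common recursive specification: one pass over the surviving letters with the previous one at hand
def pvPass2 (d : List (String × List String)) : List Char → Char → List Char → List Char
  | [], _, acc => acc
  | x :: xs, prev, acc =>
    pvPass2 d xs x
      (match pvLookup d prev with
       | some l => if String.ofList [x] ∉ l then acc ++ [x] else acc
       | none => acc ++ [x])

lemma pvBfold (d : List (String × List String)) :
    ∀ (rest : List Char) (prev : Char) (acc : List Char),
      (rest.foldl (pvStepB d) (acc, prev)).1
        = pvPass2 d (rest.filter (fun letter => letter ∉ pvDisregard)) prev acc := by
  intro rest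
  induction rest with
  | nil => intro prev acc; rfl
  | cons x xs ih =>
    intro prev acc
    by_cases hx : x ∈ pvDisregard
    · simp [List.foldl, pvStepB, hx, ih]
    · simp only [List.foldl, List.filter]
      rw [show (decide ¬x ∈ pvDisregard) = true by simp [hx]]
      cases h : pvLookup d prev with
      | some l => simp [pvStepB, hx, h, pvPass2, ih]
      | none => simp [pvStepB, hx, h, pvPass2, ih]

lemma pvRangeA (d : List (String × List String)) (fs : List Char)
    (hkeys : ∀ c ∈ fs.dropLast, (pvLookup d c).isSome) :
    ∀ (suf pre acc : List Char) (hfs : fs = pre ++ suf) (hpre : pre ≠ []),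
      (PySem.List.pyRange (pre.length : Int) (fs.length : Int) 1).foldl (pvStepA d fs) acc
        = pvPass2 d suf (pre.getLast hpre) acc := by
  intro suf
  induction suf with
  | nil =>
    intro pre acc hfs hpre
    subst hfs
    rw [PySem.List.pyRange_one_eq_nil (by simp)]
    rfl
  | cons x xs ih =>
    intro pre acc hfs hpre
    have hlen : (pre.length : Int) < ((fs.length : Int)) := by
      subst hfs; simp
    rw [PySem.List.pyRange_one_cons hlen]
    simp only [List.foldl]
    -- evaluate the step at index pre.length
    have hprev : PySem.List.pyGetD fs ((pre.length : Int) - 1) ' ' = pre.getLast hpre := by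
      have h1 : ((pre.length : Int) - 1) = ((pre.length - 1 : Nat) : Int) := by
        have : 0 < pre.length := List.length_pos_iff.mpr hpre
        omega
      rw [h1, PySem.List.pyGetD_natCast]
      subst hfs
      have hp : pre.length - 1 < pre.length := by
        have : 0 < pre.length := List.length_pos_iff.mpr hpre
        omega
      rw [List.getD_eq_getElem?_getD, List.getElem?_append_left (by omega),
        List.getElem?_eq_getElem hp]
      simp [List.getLast_eq_getElem]
    have hcur : PySem.List.pyGetD fs (pre.length : Int) ' ' = x := by
      rw [PySem.List.pyGetD_natCast]
      subst hfs
      rw [List.getD_eq_getElem?_getD, List.getElem?_append_right (le_refl _)]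
      simp
    have hmem : pre.getLast hpre ∈ fs.dropLast := by
      subst hfs
      rw [List.dropLast_append_cons]
      exact List.mem_append_left _ (List.getLast_mem hpre)
    cases hlk : pvLookup d (pre.getLast hpre) with
    | none =>
      exact absurd (hkeys _ hmem) (by simp [hlk])
    | some l =>
      have hstep : pvStepA d fs acc (pre.length : Int)
          = (if String.ofList [x] ∉ l then acc ++ [x] else acc) := by
        simp only [pvStepA, hprev, hcur, hlk]
      have hnext : (pre.length : Int) + 1 = ((pre ++ [x]).length : Int) := by simp
      rw [hstep, hnext,
        ih (pre ++ [x]) _ (by simpa using hfs) (by simp)]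
      rw [List.getLast_concat]
      simp [pvPass2, hlk]

-- ===== VERDICT (by name: the statement is the Claim_ definition above) =====
theorem disregarder_spec : Claim_equal_disregarder := by
  intro nameInput d _hdom hpre
  unfold Spec_disregarder
  obtain ⟨hne, hkeys⟩ := hpre
  unfold disregarder disregarder_alt
  cases hn : nameInput.toList with
  | nil => rfl
  | cons c rest =>
    rw [hn] at hkeys
    rw [List.all_eq_true] at hkeys
    simp only
    have hfirst : rest.foldl (fun acc letter => if letter ∉ pvDisregard then acc ++ [letter] else acc) [c]
        = [c] ++ rest.filter (fun letter => letter ∉ pvDisregard) := by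
      exact PySem.List.foldl_append_ite_eq_filter _ _ _
    rw [hfirst, pvBfold, PySem.List.len_eq]
    have h1 : (1 : Int) = (([c] : List Char).length : Int) := by simp
    nth_rewrite 1 [h1]
    rw [pvRangeA d ([c] ++ rest.filter (fun letter => letter ∉ pvDisregard))
      (by simpa [pvKeysL] using hkeys)
      (rest.filter (fun letter => letter ∉ pvDisregard)) [c] [c] rfl (by simp)]
    rfl
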